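-- pv_equiv track=rewrite | github.com/pypi-data/pypi-mirror-267 | packages/ferramentas-basicas-pln/ferramentas_basicas_pln-0.9.9.8-py3-none-any.whl/ferramentas_basicas_pln/main.py | separarFrasesNaMesmaLinha
-- ===== SOURCE A (Python) =====
-- def verificaAbreviacao(texto : str) -> bool:
--     if texto[-2].isupper() and texto[-3] == ' ': # # Se terminar com a abreviação, ou por exemplo: "Igor C. de Souza" contemplaremos o "C." sem terminar a frase
--         return True
--     texto = texto.lower()
--     for abreviacao in ['dr.','sr.','dra.','sra.','srta.',
--                        'prof.','profa.','prof°.','profª.',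
--                        'min.','nº.', # "Ministério"
--                        'pág.','pag','pg.','p.','cap.',
--                        'in.','op.','cit.','fg.','fig.',
--                        'vers.', 'nat.',
--                        'm.','e.','dic.','abr.','id.','rubr.','univ.','med.','gên.']: # "Versículo", "Dr.rer.nat."
--         if texto.endswith(abreviacao):
--             return True
--     return False
--
-- def separarFrasesNaMesmaLinha(frase_linha : str) -> list[str]:
--     frase_linha = frase_linha.replace('(...)','')
--     index_frase_final = []
--     frases = []
--     i = 0
--     tamanho_texto = len(frase_linha)
--     while i < tamanho_texto:
--         c = frase_linha[i]
--         if c in ['!','?',';']: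
--             if i + 1 < tamanho_texto:
--                 if frase_linha[i+1] == ' ':
--                     index_frase_final.append(i+1)
--             else:
--                 index_frase_final.append(i+1)
--         elif c == '.':
--             if i + 1 < tamanho_texto:
--                 if not frase_linha[i+1] == '.':
--                     if frase_linha[i+1] == ' ': # Elimina links e qualquer coisa que depois do ponto venha junto "1.2 google.com.br"
--                         if i-7 >= 0:
--                             parte_inicial = i-7
--                         else:
--                             parte_inicial = 0
--                         if not (verificaAbreviacao(frase_linha[parte_inicial:i+1]) ): # or frase_linha[i+1].isdigit() --> Elimina abreviações e números com pontos "1.200" --> Removido, pois a regra do espaço já enquadra esta situação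
--                             index_frase_final.append(i)
--             else:
--                 if i-7 >= 0:
--                     parte_inicial = i-7
--                 else:
--                     parte_inicial = 0
--                 if not verificaAbreviacao(frase_linha[parte_inicial:i+1]):
--                     index_frase_final.append(i+1)
--         i += 1
--     if not index_frase_final:
--         index_frase_final.append(tamanho_texto)
--
--     for j,index in enumerate(index_frase_final):
--         if j == 0:
--             frases.append(frase_linha[0:index+1].strip())
--         elif j == tamanho_texto - 1:
--             frases.append(frase_linha[index:].strip())
--         else:
--             frases.append(frase_linha[index_frase_final[j-1]+1:index+1].strip())
--     return frases
-- ===== SOURCE B (Python) =====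
-- def verificaAbreviacao(texto : str) -> bool:
--     if texto[-2].isupper() and texto[-3] == ' ':
--         return True
--     texto = texto.lower()
--     for abreviacao in ['dr.','sr.','dra.','sra.','srta.',
--                        'prof.','profa.','prof°.','profª.',
--                        'min.','nº.',
--                        'pág.','pag','pg.','p.','cap.',
--                        'in.','op.','cit.','fg.','fig.',
--                        'vers.', 'nat.',
--                        'm.','e.','dic.','abr.','id.','rubr.','univ.','med.','gên.']:
--         if texto.endswith(abreviacao):
--             return True
--     return False
--
-- def _corte(t, n, i, c):
--     # cut position at index i, or None if no sentence ends here
--     if c in '!?;':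
--         if i + 1 < n:
--             return i + 1 if t[i+1] == ' ' else None
--         return i + 1
--     if c == '.':
--         if i + 1 < n:
--             if t[i+1] == ' ' and not verificaAbreviacao(t[max(i-7,0):i+1]):
--                 return i
--             return None
--         if not verificaAbreviacao(t[max(i-7,0):i+1]):
--             return i + 1
--         return None
--     return None
--
-- def separarFrasesNaMesmaLinha(frase_linha : str) -> list[str]:
--     # one streaming pass: emit each sentence as soon as its cut position is found
--     t = frase_linha.replace('(...)','')
--     n = len(t)
--     frases = []
--     start = 0
--     found = False
--     for i, c in enumerate(t):
--         p = _corte(t, n, i, c)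
--         if p is not None:
--             frases.append(t[start:p+1].strip())
--             start = p + 1
--             found = True
--     if not found:
--         frases.append(t.strip())
--     return frases
-- ===== Notes on version B (the rewrite author's own statement) =====
-- stated objective: simpler
-- what changed: A makes two passes (collect all boundary indices into a list, then re-slice the text between stored indices, looking up the previous index); B is one streaming pass that keeps a start cursor and emits each sentence the moment its cut position is found, with the boundary test factored into a helper _corte.
-- outside the precondition, e.g. on separarFrasesNaMesmaLinha('.'): A raises IndexError, B raises IndexError; on separarFrasesNaMesmaLinha('A. b'): A raises IndexError, B raises IndexError
import Mathlib
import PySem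

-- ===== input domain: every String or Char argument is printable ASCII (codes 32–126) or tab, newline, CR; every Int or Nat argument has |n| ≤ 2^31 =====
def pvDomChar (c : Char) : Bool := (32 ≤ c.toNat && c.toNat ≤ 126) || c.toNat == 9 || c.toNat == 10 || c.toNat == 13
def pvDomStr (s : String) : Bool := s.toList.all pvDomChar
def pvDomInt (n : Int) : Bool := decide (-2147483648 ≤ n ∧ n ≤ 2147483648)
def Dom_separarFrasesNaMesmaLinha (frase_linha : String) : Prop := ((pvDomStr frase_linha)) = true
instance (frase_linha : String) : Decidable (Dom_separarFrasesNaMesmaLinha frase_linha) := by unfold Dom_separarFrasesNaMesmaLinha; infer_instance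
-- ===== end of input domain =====

-- B replaces A's two-pass scheme (collect all boundary indices, then slice between stored
-- indices) by one streaming pass that emits each sentence as soon as its cut position is
-- found (objective: simpler; return value only — neither program mutates its argument).

-- ===== PORT A =====
-- shared module helper, on the character list of the Python str
def verificaAbreviacao (texto : List Char) : Bool :=
  -- texto[-2].isupper() and texto[-3] == ' '  (defaults are only reached where the Python
  -- raises IndexError; those inputs are excluded by Pre_ below)
  if PySem.Chars.isupper ((PySem.List.pyGet? texto (-2)).getD ' ') &&
      (((PySem.List.pyGet? texto (-3)).getD '?') == ' ') then
    true
  else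
    let texto := PySem.Chars.lower texto
    -- for abreviacao in [...]: if texto.endswith(abreviacao): return True
    (["dr.", "sr.", "dra.", "sra.", "srta.",
      "prof.", "profa.", "prof°.", "profª.",
      "min.", "nº.",
      "pág.", "pag", "pg.", "p.", "cap.",
      "in.", "op.", "cit.", "fg.", "fig.",
      "vers.", "nat.",
      "m.", "e.", "dic.", "abr.", "id.", "rubr.", "univ.", "med.", "gên."].map String.toList).any
      (fun abreviacao => PySem.Chars.endswith texto abreviacao)

def separarFrasesNaMesmaLinha (frase_linha : String) : List String :=
  let fl : List Char := (PySem.Str.replace frase_linha "(...)" "").toList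
  let tamanho_texto : Int := (fl.length : Int)
  -- while i < tamanho_texto: … collect index_frase_final
  let index_frase_final : List Int :=
    (PySem.List.pyRange 0 tamanho_texto).foldl (fun index_frase_final i =>
      let c := PySem.List.pyGetD fl i ' '
      if c == '!' || c == '?' || c == ';' then      -- c in ['!','?',';']
        if i + 1 < tamanho_texto then
          if PySem.List.pyGetD fl (i + 1) ' ' == ' ' then index_frase_final ++ [i + 1]
          else index_frase_final
        else index_frase_final ++ [i + 1]
      else if c == '.' then
        if i + 1 < tamanho_texto then
          if !(PySem.List.pyGetD fl (i + 1) ' ' == '.') then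
            if PySem.List.pyGetD fl (i + 1) ' ' == ' ' then
              let parte_inicial : Int := if 0 ≤ i - 7 then i - 7 else 0
              if !(verificaAbreviacao (PySem.List.slice fl (some parte_inicial) (some (i + 1)))) then
                index_frase_final ++ [i]
              else index_frase_final
            else index_frase_final
          else index_frase_final
        else
          let parte_inicial : Int := if 0 ≤ i - 7 then i - 7 else 0
          if !(verificaAbreviacao (PySem.List.slice fl (some parte_inicial) (some (i + 1)))) then
            index_frase_final ++ [i + 1]
          else index_frase_final
      else index_frase_final) []
  let index_frase_final :=
    if index_frase_final.isEmpty then index_frase_final ++ [tamanho_texto] else index_frase_final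
  -- for j, index in enumerate(index_frase_final): …
  (PySem.List.enumerate index_frase_final).foldl (fun frases ji =>
    if ji.1 == 0 then
      frases ++ [String.ofList (PySem.Chars.strip (PySem.List.slice fl (some 0) (some (ji.2 + 1))))]
    else if ji.1 == tamanho_texto - 1 then
      frases ++ [String.ofList (PySem.Chars.strip (PySem.List.slice fl (some ji.2) none))]
    else
      frases ++ [String.ofList (PySem.Chars.strip (PySem.List.slice fl
        (some (PySem.List.pyGetD index_frase_final (ji.1 - 1) 0 + 1)) (some (ji.2 + 1))))]) []

-- ===== PORT B =====
-- _corte(t, n, i, c): the cut position at index i, or None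
def pvCorte (t : List Char) (n i : Int) (c : Char) : Option Int :=
  if c == '!' || c == '?' || c == ';' then           -- c in '!?;'
    if i + 1 < n then
      if PySem.List.pyGetD t (i + 1) ' ' == ' ' then some (i + 1) else none
    else some (i + 1)
  else if c == '.' then
    if i + 1 < n then
      if PySem.List.pyGetD t (i + 1) ' ' == ' ' &&
          !(verificaAbreviacao (PySem.List.slice t (some (max (i - 7) 0)) (some (i + 1)))) then
        some i
      else none
    else
      if !(verificaAbreviacao (PySem.List.slice t (some (max (i - 7) 0)) (some (i + 1)))) then
        some (i + 1)
      else none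
  else none

def separarFrasesNaMesmaLinha_alt (frase_linha : String) : List String :=
  let t : List Char := (PySem.Str.replace frase_linha "(...)" "").toList
  let n : Int := (t.length : Int)
  -- for i, c in enumerate(t): p = _corte(t, n, i, c); if p is not None: emit, advance
  let st :=
    (PySem.List.enumerate t).foldl
      (fun (st : List String × Int × Bool) ic =>
        match pvCorte t n ic.1 ic.2 with
        | some p =>
            (st.1 ++ [String.ofList (PySem.Chars.strip (PySem.List.slice t (some st.2.1) (some (p + 1))))],
             p + 1, true)
        | none => st)
      ([], 0, false)
  if !st.2.2 then st.1 ++ [String.ofList (PySem.Chars.strip t)] else st.1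

-- ===== PRECONDITION & SPEC =====
-- Pre_ excludes exactly the inputs on which the Python A raises IndexError inside
-- verificaAbreviacao: a sentence-final '.' at position 0, or at position 1 preceded by an
-- uppercase character, of the text after the parenthesised-ellipsis marker has been removed (B raises there too).
def Pre_separarFrasesNaMesmaLinha (frase_linha : String) : Prop :=
  let t := (PySem.Str.replace frase_linha "(...)" "").toList
  ¬ (t.getD 0 'a' = '.' ∧ (t.length = 1 ∨ t.getD 1 'a' = ' ')) ∧
  ¬ (t.getD 1 'a' = '.' ∧ (t.length = 2 ∨ t.getD 2 'a' = ' ') ∧ PySem.Chars.isupper (t.getD 0 'a') = true)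
instance (frase_linha : String) : Decidable (Pre_separarFrasesNaMesmaLinha frase_linha) := by
  unfold Pre_separarFrasesNaMesmaLinha; infer_instance

def pvWitness_separarFrasesNaMesmaLinha : String := "Oi! Tudo bem? Sim. Ate depois"

def Spec_separarFrasesNaMesmaLinha (frase_linha : String) (out : List String) : Prop :=
  out = separarFrasesNaMesmaLinha_alt frase_linha
instance (frase_linha : String) (out : List String) : Decidable (Spec_separarFrasesNaMesmaLinha frase_linha out) := by
  unfold Spec_separarFrasesNaMesmaLinha; infer_instance

-- ===== CLAIM (what is proved, stated in full; the proofs are below) =====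
def Claim_equal_separarFrasesNaMesmaLinha : Prop := ∀ (frase_linha : String), Dom_separarFrasesNaMesmaLinha frase_linha → Pre_separarFrasesNaMesmaLinha frase_linha → Spec_separarFrasesNaMesmaLinha frase_linha (separarFrasesNaMesmaLinha frase_linha)

-- ===== LEMMAS AND PROOFS =====

-- the boundary signal both programs compute at index i of fl
def pvQ (fl : List Char) (i : Int) : Option Int :=
  pvCorte fl (fl.length : Int) i (PySem.List.pyGetD fl i ' ')

-- all cut positions, in scan order
def pvPs (fl : List Char) : List Int :=
  (PySem.List.pyRange 0 (fl.length : Int)).flatMap (fun i => (pvQ fl i).toList)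

lemma pvPs_def (fl : List Char) :
    pvPs fl = (PySem.List.pyRange 0 (fl.length : Int)).flatMap (fun i => (pvQ fl i).toList) := rfl

-- the sentences cut at the positions of l, starting at start
def pvSent (fl : List Char) : Int → List Int → List String
  | _, [] => []
  | start, p :: rest =>
      String.ofList (PySem.Chars.strip (PySem.List.slice fl (some start) (some (p + 1)))) ::
        pvSent fl (p + 1) rest

-- A's second-pass body as a function of (j, index)
def pvGA (fl : List Char) (idxs : List Int) (ji : Int × Int) : String :=
  if ji.1 == 0 then
    String.ofList (PySem.Chars.strip (PySem.List.slice fl (some 0) (some (ji.2 + 1))))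
  else if ji.1 == (fl.length : Int) - 1 then
    String.ofList (PySem.Chars.strip (PySem.List.slice fl (some ji.2) none))
  else
    String.ofList (PySem.Chars.strip (PySem.List.slice fl
      (some (PySem.List.pyGetD idxs (ji.1 - 1) 0 + 1)) (some (ji.2 + 1))))

-- the common result both ports compute
def pvResult (fl : List Char) : List String :=
  if pvPs fl = [] then [String.ofList (PySem.Chars.strip fl)] else pvSent fl 0 (pvPs fl)

lemma pass1_eq (fl : List Char) :
    (PySem.List.pyRange 0 (fl.length : Int)).foldl (fun index_frase_final i =>
      if PySem.List.pyGetD fl i ' ' == '!' || PySem.List.pyGetD fl i ' ' == '?' || PySem.List.pyGetD fl i ' ' == ';' then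
        if i + 1 < (fl.length : Int) then
          if PySem.List.pyGetD fl (i + 1) ' ' == ' ' then index_frase_final ++ [i + 1]
          else index_frase_final
        else index_frase_final ++ [i + 1]
      else if PySem.List.pyGetD fl i ' ' == '.' then
        if i + 1 < (fl.length : Int) then
          if !(PySem.List.pyGetD fl (i + 1) ' ' == '.') then
            if PySem.List.pyGetD fl (i + 1) ' ' == ' ' then
              if !(verificaAbreviacao (PySem.List.slice fl (some (if 0 ≤ i - 7 then i - 7 else 0)) (some (i + 1)))) then
                index_frase_final ++ [i]
              else index_frase_final
            else index_frase_final
          else index_frase_final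
        else
          if !(verificaAbreviacao (PySem.List.slice fl (some (if 0 ≤ i - 7 then i - 7 else 0)) (some (i + 1)))) then
            index_frase_final ++ [i + 1]
          else index_frase_final
      else index_frase_final) [] = pvPs fl := by
  rw [pvPs_def, ← List.nil_append (List.flatMap _ _),
    ← PySem.List.foldl_append_eq_flatMap (fun i => (pvQ fl i).toList) (PySem.List.pyRange 0 (fl.length : Int)) []]
  apply PySem.List.foldl_congr_mem
  intro acc i _
  have hm : (if (0:Int) ≤ i - 7 then i - 7 else 0) = max (i - 7) 0 := by split_ifs <;> omega
  simp only [pvQ, pvCorte, hm]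
  split_ifs <;> simp_all

lemma pass2_eq (fl : List Char) (idxs : List Int) :
    (PySem.List.enumerate idxs).foldl (fun frases ji =>
      if ji.1 == 0 then
        frases ++ [String.ofList (PySem.Chars.strip (PySem.List.slice fl (some 0) (some (ji.2 + 1))))]
      else if ji.1 == (fl.length : Int) - 1 then
        frases ++ [String.ofList (PySem.Chars.strip (PySem.List.slice fl (some ji.2) none))]
      else
        frases ++ [String.ofList (PySem.Chars.strip (PySem.List.slice fl
          (some (PySem.List.pyGetD idxs (ji.1 - 1) 0 + 1)) (some (ji.2 + 1))))]) []
      = (PySem.List.enumerate idxs).map (pvGA fl idxs) := by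
  rw [show (fun (frases : List String) (ji : Int × Int) =>
      if ji.1 == 0 then
        frases ++ [String.ofList (PySem.Chars.strip (PySem.List.slice fl (some 0) (some (ji.2 + 1))))]
      else if ji.1 == (fl.length : Int) - 1 then
        frases ++ [String.ofList (PySem.Chars.strip (PySem.List.slice fl (some ji.2) none))]
      else
        frases ++ [String.ofList (PySem.Chars.strip (PySem.List.slice fl
          (some (PySem.List.pyGetD idxs (ji.1 - 1) 0 + 1)) (some (ji.2 + 1))))])
    = fun frases ji => frases ++ [pvGA fl idxs ji] from by
      funext frases ji
      simp only [pvGA]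
      split_ifs <;> rfl]
  rw [PySem.List.foldl_append_singleton_eq_map, List.nil_append]

lemma pvSent_length (fl : List Char) : ∀ (l : List Int) (start : Int),
    (pvSent fl start l).length = l.length := by
  intro l
  induction l with
  | nil => intro start; rfl
  | cons p rest ih => intro start; simp [pvSent, ih]

lemma pvSent_getElem (fl : List Char) : ∀ (l : List Int) (start : Int) (k : Nat) (hk : k < l.length),
    (pvSent fl start l)[k]'(by rw [pvSent_length]; exact hk)
      = String.ofList (PySem.Chars.strip (PySem.List.slice fl
          (some (if hk0 : k = 0 then start else l[k-1]'(by omega) + 1)) (some (l[k]'hk + 1)))) := by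
  intro l
  induction l with
  | nil => intro start k hk; simp at hk
  | cons p rest ih =>
    intro start k hk
    cases k with
    | zero => simp [pvSent]
    | succ k =>
      have hk' : k < rest.length := by simpa using hk
      have := ih (p + 1) k hk'
      simp only [pvSent, List.getElem_cons_succ, this]
      cases k with
      | zero => simp
      | succ k => simp

lemma pvGetD_oob (fl : List Char) (j : Int) (h : (fl.length : Int) ≤ j) :
    PySem.List.pyGetD fl j ' ' = ' ' := by
  have h0 : (0:Int) ≤ j := le_trans (by positivity) h
  simp only [PySem.List.pyGetD, PySem.List.pyGet?, PySem.List.pyIdx?]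
  rw [if_pos h0, if_neg (by omega)]
  rfl

lemma pvQ_succ_none (fl : List Char) (i : Int) (h : (pvQ fl i).isSome) : pvQ fl (i + 1) = none := by
  have hsp : PySem.List.pyGetD fl (i + 1) ' ' = ' ' := by
    by_cases hn : i + 1 < (fl.length : Int)
    · simp only [pvQ, pvCorte] at h
      split_ifs at h <;> simp_all
    · exact pvGetD_oob fl (i + 1) (by omega)
  simp [pvQ, pvCorte, hsp]

lemma pvCount_le (fl : List Char) : ∀ m : Nat,
    (List.flatMap (fun (k : Nat) => (pvQ fl (k : Int)).toList) (List.range m)).length ≤ (m + 1) / 2 := by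
  intro m
  induction m using Nat.strong_induction_on with
  | _ m ih =>
    match m with
    | 0 => simp
    | 1 =>
      simp only [List.range_one, List.flatMap_cons, List.flatMap_nil, List.append_nil]
      cases pvQ fl ((0:Nat):Int) <;> simp
    | (k+2) =>
      have hk := ih k (by omega)
      have hr : List.range (k+2) = List.range k ++ [k, k+1] := by
        rw [List.range_succ, List.range_succ]
        simp
      rw [hr, List.flatMap_append]
      simp only [List.length_append]
      have h2 : (List.flatMap (fun (j : Nat) => (pvQ fl (j : Int)).toList) [k, k+1]).length ≤ 1 := by
        simp only [List.flatMap_cons, List.flatMap_nil, List.append_nil, List.length_append]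
        by_cases hq : (pvQ fl (k : Int)).isSome
        · have hnone := pvQ_succ_none fl (k : Int) hq
          have hcast : ((k+1 : Nat) : Int) = (k : Int) + 1 := by push_cast; ring
          rw [hcast, hnone]
          cases pvQ fl (k : Int) <;> simp
        · rw [Option.not_isSome_iff_eq_none] at hq
          rw [hq]
          cases pvQ fl ((k+1 : Nat) : Int) <;> simp
      omega

lemma pvPs_length (fl : List Char) : (pvPs fl).length ≤ (fl.length + 1) / 2 := by
  rw [pvPs_def, PySem.List.pyRange_one, List.flatMap_map]
  have h0 : ((fl.length : Int) - 0).toNat = fl.length := by omega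
  rw [h0]
  simpa using pvCount_le fl fl.length

lemma map_gA_eq_sent (fl : List Char) (ps : List Int)
    (hb : ∀ k : Nat, 1 ≤ k → k < ps.length → ((k : Int) ≠ (fl.length : Int) - 1)) :
    (PySem.List.enumerate ps).map (pvGA fl ps) = pvSent fl 0 ps := by
  apply List.ext_getElem
  · simp [PySem.List.length_enumerate, pvSent_length]
  · intro k h1 h2
    have hlen : k < ps.length := by simpa [PySem.List.length_enumerate] using h1
    rw [List.getElem_map, PySem.List.getElem_enumerate, pvSent_getElem fl ps 0 k hlen]
    simp only [pvGA, zero_add]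
    by_cases hk : k = 0
    · subst hk
      simp
    · have hknz : ((k : Int) == 0) = false := by simp; omega
      have hkne : ((k : Int) == (fl.length : Int) - 1) = false := by
        simp
        exact hb k (by omega) hlen
      rw [hknz, hkne]
      simp only [Bool.false_eq_true, if_false, dif_neg hk]
      have hc : ((k : Int) - 1) = ((k - 1 : Nat) : Int) := by omega
      rw [hc, PySem.List.pyGetD_natCast]
      rw [List.getD_eq_getElem?_getD, List.getElem?_eq_getElem (by omega)]
      rfl

lemma bfold (fl : List Char) : ∀ (l : List Int) (fr : List String) (start : Int) (found : Bool),
    l.foldl (fun (st : List String × Int × Bool) i =>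
        match pvCorte fl (fl.length : Int) i (PySem.List.pyGetD fl i ' ') with
        | some p =>
            (st.1 ++ [String.ofList (PySem.Chars.strip (PySem.List.slice fl (some st.2.1) (some (p + 1))))],
             p + 1, true)
        | none => st) (fr, start, found)
      = (fr ++ pvSent fl start (l.flatMap fun i => (pvQ fl i).toList),
         (l.flatMap fun i => (pvQ fl i).toList).foldl (fun _ p => p + 1) start,
         found || !(l.flatMap fun i => (pvQ fl i).toList).isEmpty) := by
  intro l
  induction l with
  | nil => intro fr start found; simp [pvSent]
  | cons i l ih =>
    intro fr start found
    simp only [List.foldl_cons, List.flatMap_cons]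
    cases hq : pvQ fl i with
    | none =>
      rw [show pvCorte fl (fl.length : Int) i (PySem.List.pyGetD fl i ' ') = none from hq]
      rw [ih fr start found]
      simp
    | some p =>
      rw [show pvCorte fl (fl.length : Int) i (PySem.List.pyGetD fl i ' ') = some p from hq]
      rw [ih]
      simp [pvSent, List.append_assoc]

set_option maxHeartbeats 1600000 in
lemma A_eq (s : String) :
    separarFrasesNaMesmaLinha s = pvResult ((PySem.Str.replace s "(...)" "").toList) := by
  simp only [separarFrasesNaMesmaLinha]
  rw [pass1_eq]
  set X := (PySem.Str.replace s "(...)" "").toList with hX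
  by_cases hps : pvPs X = []
  · rw [hps]
    simp only [List.isEmpty_nil, if_true, List.nil_append]
    rw [pass2_eq]
    simp only [PySem.List.enumerate_cons, PySem.List.enumerate_nil, List.map_cons, List.map_nil]
    simp only [pvGA, beq_self_eq_true, if_true]
    have hsl : PySem.List.slice X (some 0) (some ((X.length : Int) + 1)) = X := by
      have h1 : ((X.length : Int) + 1) = ((X.length + 1 : Nat) : Int) := by push_cast; ring
      rw [h1, show ((0:Int)) = ((0 : Nat) : Int) from rfl, PySem.List.slice_natCast]
      simp
    rw [hsl, pvResult, hps]
    simp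
  · rw [if_neg (by simpa [List.isEmpty_iff] using hps)]
    rw [pass2_eq, map_gA_eq_sent, pvResult, if_neg hps]
    intro k hk1 hk2
    have hL := pvPs_length X
    omega

set_option maxHeartbeats 1600000 in
lemma B_eq (s : String) :
    separarFrasesNaMesmaLinha_alt s = pvResult ((PySem.Str.replace s "(...)" "").toList) := by
  simp only [separarFrasesNaMesmaLinha_alt]
  rw [PySem.List.enumerate_eq_map_pyRange _ ' ', List.foldl_map]
  simp only [PySem.List.len_eq]
  set X := (PySem.Str.replace s "(...)" "").toList with hX
  rw [PySem.List.foldl_congr_mem (PySem.List.pyRange 0 (X.length : Int)) _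
    (fun (st : List String × Int × Bool) i =>
      match pvCorte X (X.length : Int) i (PySem.List.pyGetD X i ' ') with
      | some p =>
          (st.1 ++ [String.ofList (PySem.Chars.strip (PySem.List.slice X (some st.2.1) (some (p + 1))))],
           p + 1, true)
      | none => st) ([], 0, false) (fun acc x _ => rfl)]
  rw [bfold X (PySem.List.pyRange 0 (X.length : Int)) [] 0 false]
  rw [← pvPs_def]
  cases hps : pvPs X with
  | nil => simp [pvResult, hps, pvSent]
  | cons a as => simp [pvResult, hps]

-- ===== VERDICT (by name: the statement is the Claim_ definition above) =====
theorem separarFrasesNaMesmaLinha_spec : Claim_equal_separarFrasesNaMesmaLinha := by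
  intro s _ _
  unfold Spec_separarFrasesNaMesmaLinha
  rw [A_eq, B_eq]
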